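-- pv_equiv track=rewrite | github.com/ZiyiZhaZ/practice | LAB/UsernameValidation.py | letter_and_number
-- ===== SOURCE A (Python) =====
-- def letter_and_number(username):
--     if username == '':
--         return False
--
--     # Initialize values of two Boolean variables, has_letter and has_number to keep track of whether we have
--     # found a letter or number yet (we give them the initial value of False, and set them to True if found)
--     has_letter = False
--     has_number = False
--
--     # Initialize an index variable to 0 to start at the first character in the string username,
--     # and increment after each iteration of the while loop to move to the next character
--     index = 0
--
--     # While we have not yet found both a letter and a number, check the character at "index"
--     while not has_letter or not has_number:
--         if username[index].isalpha():
--             has_letter = True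
--         elif username[index].isdigit():
--             has_number = True
--
--         # If we are currently on the last letter of the username, then break out of the while loop.
--         # Else, increment index to move to the next letter in another iteration of the while loop
--         # TODO #4: Write the if/else statement described above
--
--         if index == len(username) - 1:
--             break
--         else:
--             index += 1
--
--
--     # Check if the conditions are satisfied, and return True or False accordingly
--     if has_letter and has_number:
--         return True
--     else:
--         return False
-- ===== SOURCE B (Python) =====
-- def letter_and_number(username):
--     return any(c.isalpha() for c in username) and any(c.isdigit() for c in username)
-- ===== Notes on version B (the rewrite author's own statement) =====
-- stated objective: idiomatic
-- what changed: Replaces the flag-tracking indexed while-loop (and its explicit empty-string guard) with two short-circuiting any() existence passes over the string, moving the per-character work into C-level iteration.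
import Mathlib
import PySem

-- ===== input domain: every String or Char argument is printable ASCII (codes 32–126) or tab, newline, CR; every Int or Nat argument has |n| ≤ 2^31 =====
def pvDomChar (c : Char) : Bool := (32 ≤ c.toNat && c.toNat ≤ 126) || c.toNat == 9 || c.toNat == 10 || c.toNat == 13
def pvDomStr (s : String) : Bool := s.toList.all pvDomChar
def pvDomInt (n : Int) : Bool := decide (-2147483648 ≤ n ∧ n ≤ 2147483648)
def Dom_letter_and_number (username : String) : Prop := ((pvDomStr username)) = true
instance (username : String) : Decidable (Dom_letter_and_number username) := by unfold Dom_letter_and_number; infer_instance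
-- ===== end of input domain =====

-- B replaces A's flag-tracking indexed while-loop (with its empty-string guard) by two
-- short-circuiting existence passes (any isalpha, any isdigit); idiomatic, same cost.

-- ===== PORT A =====
-- the while loop: scan characters in order, updating the two flags, exiting early once
-- both are true (the 'while not has_letter or not has_number' condition) or at the last
-- character (the 'break'); recursion over the remaining characters replaces the index.
def pvLoopA : List Char → Bool → Bool → Bool × Bool
  | [], hasL, hasN => (hasL, hasN)
  | c :: rest, hasL, hasN =>
    if !hasL || !hasN then
      if PySem.Chars.isalpha c then pvLoopA rest true hasN
      else if PySem.Chars.isdigit c then pvLoopA rest hasL true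
      else pvLoopA rest hasL hasN
    else (hasL, hasN)

def letter_and_number (username : String) : Bool :=
  if username == "" then false
  else
    let r := pvLoopA username.toList false false
    if r.1 && r.2 then true else false

-- ===== PORT B =====
def letter_and_number_alt (username : String) : Bool :=
  username.toList.any PySem.Chars.isalpha && username.toList.any PySem.Chars.isdigit

-- ===== PRECONDITION & SPEC =====
def Spec_letter_and_number (username : String) (out : Bool) : Prop := out = letter_and_number_alt username
instance (username : String) (out : Bool) : Decidable (Spec_letter_and_number username out) := by unfold Spec_letter_and_number; infer_instance

-- ===== CLAIM (what is proved, stated in full; the proofs are below) =====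
def Claim_equal_letter_and_number : Prop := ∀ (username : String), Dom_letter_and_number username → Spec_letter_and_number username (letter_and_number username)

-- ===== LEMMAS AND PROOFS =====

theorem pv_alpha_not_digit (c : Char) :
    PySem.Chars.isalpha c = true → PySem.Chars.isdigit c = false := by
  simp [PySem.Chars.isalpha, PySem.Chars.isdigit, PySem.Chars.isupper, PySem.Chars.islower]
  rintro (⟨h1, _⟩ | ⟨h1, _⟩)
  · exact fun _ => lt_of_lt_of_le (by decide) h1
  · exact fun _ => lt_of_lt_of_le (by decide) h1

theorem pvLoopA_and (cs : List Char) : ∀ (hasL hasN : Bool),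
    ((pvLoopA cs hasL hasN).1 && (pvLoopA cs hasL hasN).2) =
      ((hasL || cs.any PySem.Chars.isalpha) && (hasN || cs.any PySem.Chars.isdigit)) := by
  induction cs with
  | nil => intro hasL hasN; simp [pvLoopA]
  | cons c rest ih =>
    intro hasL hasN
    by_cases hboth : hasL = true ∧ hasN = true
    · obtain ⟨hL, hN⟩ := hboth; subst hL; subst hN; simp [pvLoopA]
    · have hcond : (!hasL || !hasN) = true := by
        cases hasL <;> cases hasN <;> simp_all
      by_cases ha : PySem.Chars.isalpha c = true
      · have hd := pv_alpha_not_digit c ha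
        simp [pvLoopA, hcond, ha, hd, ih]
      · by_cases hdg : PySem.Chars.isdigit c = true
        · simp [pvLoopA, hcond, ha, hdg, ih]
        · simp [pvLoopA, hcond, ha, hdg, ih]

-- ===== VERDICT (by name: the statement is the Claim_ definition above) =====
theorem letter_and_number_spec : Claim_equal_letter_and_number := by
  intro username _
  unfold Spec_letter_and_number letter_and_number letter_and_number_alt
  by_cases h : username = ""
  · subst h; simp
  · have h' : (username == "") = false := by simpa using h
    simp only [h', if_false]
    rw [show ∀ b : Bool, (if b then true else false) = b from fun b => by cases b <;> rfl]
    exact pvLoopA_and username.toList false false
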